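-- pv_equiv track=rewrite | github.com/m0mu/CS499 | Client.py | do_hash
-- ===== SOURCE A (Python) =====
-- window_length = 13
--
-- prime = 121501
--
-- def do_hash(fragment):
--     h_index = [28125, 64168, 7548, 42363, 32001, 99007, 65647, 33133, 113529, 71322, 82087, 110173, 69241]
--
--     result = []
--     for i in range(window_length):
--         count = 1
--         c = 0
--         for j in range(window_length):
--             c += ord(fragment[j])*pow(h_index[i], window_length-count)
--             count += 1
--         result.append(c % prime)
--     return result
-- ===== SOURCE B (Python) =====
-- window_length = 13
--
-- prime = 121501
--
-- def do_hash(fragment):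
--     h_index = [28125, 64168, 7548, 42363, 32001, 99007, 65647, 33133, 113529, 71322, 82087, 110173, 69241]
--     window = [ord(fragment[j]) for j in range(window_length)]
--     result = []
--     for h in h_index:
--         c = 0
--         for v in window:
--             c = c * h + v
--         result.append(c % prime)
--     return result
-- ===== Notes on version B (the rewrite author's own statement) =====
-- stated objective: simpler
-- what changed: B precomputes the 13 character codes once and evaluates each of the 13 hashes by Horner's rule (c = c*h + ord), eliminating A's per-term pow calls and the count variable; the modulus stays outside the loop so the accumulated integer is identical before reduction.
import Mathlib
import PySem

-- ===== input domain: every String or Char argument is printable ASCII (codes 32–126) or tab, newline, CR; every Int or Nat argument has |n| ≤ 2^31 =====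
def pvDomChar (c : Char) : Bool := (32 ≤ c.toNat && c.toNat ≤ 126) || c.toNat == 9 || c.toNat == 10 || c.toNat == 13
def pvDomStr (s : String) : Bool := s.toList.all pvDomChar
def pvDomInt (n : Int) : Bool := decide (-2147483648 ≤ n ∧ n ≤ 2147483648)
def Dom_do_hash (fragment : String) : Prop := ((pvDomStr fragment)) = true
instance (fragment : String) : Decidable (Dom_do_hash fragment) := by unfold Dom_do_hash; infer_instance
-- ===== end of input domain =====

-- B replaces A's term-by-term pow summation with a precomputed ord window and Horner evaluation (objective: simpler; no pow calls).

-- ===== PORT A =====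
-- A: for each of the 13 multipliers, sum ord(fragment[j]) * h^(13-count) with a count variable, then mod.
def do_hash (fragment : String) : List Int :=
  let h_index : List Int := [28125, 64168, 7548, 42363, 32001, 99007, 65647, 33133, 113529, 71322, 82087, 110173, 69241]
  (PySem.List.pyRange 0 13 1).foldl (fun result i =>
    let s := (PySem.List.pyRange 0 13 1).foldl (fun (s : Int × Int) j =>
      (s.1 + (((PySem.Str.pyGet? fragment j).getD ' ').toNat : Int) *
             ((PySem.List.pyGet? h_index i).getD 0) ^ ((13 - s.2).toNat), s.2 + 1))
      (0, 1)
    result ++ [PySem.Int.mod s.1 121501]) []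

-- ===== PORT B =====
-- B: precompute the 13 ords once, then Horner's rule per multiplier.
def do_hash_alt (fragment : String) : List Int :=
  let window : List Int := (PySem.List.pyRange 0 13 1).map
    (fun j => (((PySem.Str.pyGet? fragment j).getD ' ').toNat : Int))
  ([28125, 64168, 7548, 42363, 32001, 99007, 65647, 33133, 113529, 71322, 82087, 110173, 69241] : List Int).map
    (fun h => PySem.Int.mod (window.foldl (fun c v => c * h + v) 0) 121501)

-- ===== PRECONDITION & SPEC =====
-- Both Pythons raise IndexError on fragments shorter than 13 characters; Pre_ excludes exactly those.
def Pre_do_hash (fragment : String) : Prop := 13 ≤ PySem.Str.len fragment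
instance (fragment : String) : Decidable (Pre_do_hash fragment) := by unfold Pre_do_hash; infer_instance
def pvWitness_do_hash : String := "abcdefghijklm"

def Spec_do_hash (fragment : String) (out : List Int) : Prop := out = do_hash_alt fragment
instance (fragment : String) (out : List Int) : Decidable (Spec_do_hash fragment out) := by unfold Spec_do_hash; infer_instance

-- ===== CLAIM (what is proved, stated in full; the proofs are below) =====
def Claim_equal_do_hash : Prop := ∀ (fragment : String), Dom_do_hash fragment → Pre_do_hash fragment → Spec_do_hash fragment (do_hash fragment)

-- ===== LEMMAS AND PROOFS =====

set_option maxRecDepth 8192 in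
theorem do_hash_eq_of_shape (c0 c1 c2 c3 c4 c5 c6 c7 c8 c9 c10 c11 c12 : Char)
    (rest : List Char) (s : String)
    (h : s.toList = c0::c1::c2::c3::c4::c5::c6::c7::c8::c9::c10::c11::c12::rest) :
    do_hash s = do_hash_alt s := by
  simp only [do_hash, do_hash_alt,
    show PySem.List.pyRange 0 13 1 = [((0:Nat):Int), ((1:Nat):Int), ((2:Nat):Int), ((3:Nat):Int), ((4:Nat):Int), ((5:Nat):Int), ((6:Nat):Int), ((7:Nat):Int), ((8:Nat):Int), ((9:Nat):Int), ((10:Nat):Int), ((11:Nat):Int), ((12:Nat):Int)] from by decide,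
    List.foldl, List.map]
  simp only [PySem.Str.pyGet?, PySem.Chars.pyGet?_eq_listPyGet?, h, PySem.List.pyGet?_natCast]
  simp
  and_intros <;> exact congrFun (congrArg HMod.hMod (by ring)) _

-- ===== VERDICT (by name: the statement is the Claim_ definition above) =====
theorem do_hash_spec : Claim_equal_do_hash := by
  intro s _ hpre
  unfold Pre_do_hash PySem.Str.len at hpre
  match hs : s.toList, hpre with
  | c0::c1::c2::c3::c4::c5::c6::c7::c8::c9::c10::c11::c12::rest, _ =>
    exact do_hash_eq_of_shape c0 c1 c2 c3 c4 c5 c6 c7 c8 c9 c10 c11 c12 rest s hs
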